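-- pv_equiv track=rewrite | github.com/PawelMurdzek/fpgadb3 | fpgadbg_spi/fpgadbg_conv/main_fpgadbg_SPI.py | remove_9th_and_10th_from_binary
-- ===== SOURCE A (Python) =====
-- def remove_9th_and_10th_from_binary(binary_string):
--     result = []
--     for i in range(0, len(binary_string), 10):
--         block = binary_string[i:i+10]
--         if len(block) == 10:  # Only process full blocks
--             result.append(block[:8])  # Keep only the first 8 characters
--         else:
--             result.append(block)  # Append the remaining characters as is
--     return ''.join(result)
-- ===== SOURCE B (Python) =====
-- def remove_9th_and_10th_from_binary(binary_string):
--     n = len(binary_string)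
--     cut = n - n % 10
--     return ''.join(c for i, c in enumerate(binary_string)
--                    if i >= cut or i % 10 < 8)
-- ===== Notes on version B (the rewrite author's own statement) =====
-- stated objective: idiomatic
-- what changed: Replaces A's block-wise loop (slice each 10-char block, branch on its length, collect substrings, join) by a single per-character filtered comprehension: compute cut = n - n % 10 once and keep character i iff i >= cut or i % 10 < 8.
import Mathlib
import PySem

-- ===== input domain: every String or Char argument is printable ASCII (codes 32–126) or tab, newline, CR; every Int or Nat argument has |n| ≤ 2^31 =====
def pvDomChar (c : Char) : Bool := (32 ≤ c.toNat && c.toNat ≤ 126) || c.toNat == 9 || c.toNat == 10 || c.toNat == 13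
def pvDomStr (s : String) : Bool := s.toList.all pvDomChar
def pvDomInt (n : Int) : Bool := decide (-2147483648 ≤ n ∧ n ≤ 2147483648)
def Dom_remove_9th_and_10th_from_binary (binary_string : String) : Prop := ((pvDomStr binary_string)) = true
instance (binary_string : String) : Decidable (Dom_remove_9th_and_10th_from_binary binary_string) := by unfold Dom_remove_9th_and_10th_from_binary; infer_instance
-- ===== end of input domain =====

-- B replaces A's block-wise slice-and-branch loop by one per-character filtered scan (same O(n) cost, shorter); return value only, no mutation.

-- ===== PORT A =====
-- ''.join(result) on list-of-strings is ported as flatten at the character level, then String.ofList (exact).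
def remove_9th_and_10th_from_binary (binary_string : String) : String :=
  let result := (PySem.List.pyRange 0 (PySem.Str.len binary_string) 10).foldl
    (fun acc i =>
      let block := PySem.List.slice binary_string.toList (some i) (some (i + 10))
      if block.length = 10 then acc ++ [PySem.List.slice block none (some 8)]
      else acc ++ [block]) []
  String.ofList result.flatten

-- ===== PORT B =====
-- ''.join over the filtered generator is ported as filter + map snd at the character level, then String.ofList (exact).
def remove_9th_and_10th_from_binary_alt (binary_string : String) : String :=
  let n : Int := PySem.Str.len binary_string
  let cut : Int := n - PySem.Int.mod n 10
  String.ofList (((PySem.List.enumerate binary_string.toList 0).filter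
      (fun p => decide (cut ≤ p.1) || decide (PySem.Int.mod p.1 10 < 8))).map (·.2))

-- ===== PRECONDITION & SPEC =====
def Spec_remove_9th_and_10th_from_binary (binary_string : String) (out : String) : Prop := out = remove_9th_and_10th_from_binary_alt binary_string
instance (binary_string : String) (out : String) : Decidable (Spec_remove_9th_and_10th_from_binary binary_string out) := by unfold Spec_remove_9th_and_10th_from_binary; infer_instance

-- ===== CLAIM (what is proved, stated in full; the proofs are below) =====
def Claim_equal_remove_9th_and_10th_from_binary : Prop := ∀ (binary_string : String), Dom_remove_9th_and_10th_from_binary binary_string → Spec_remove_9th_and_10th_from_binary binary_string (remove_9th_and_10th_from_binary binary_string)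

-- ===== LEMMAS AND PROOFS =====

-- Common recursive characterisation: keep the first 8 of each full 10-block, copy a short tail verbatim.
def pvChunkSpec (cs : List Char) : List Char :=
  if cs.length < 10 then cs else cs.take 8 ++ pvChunkSpec (cs.drop 10)
termination_by cs.length
decreasing_by simp; omega

-- A's per-block body as a function of the block.
def pvF (block : List Char) : List Char :=
  if block.length = 10 then PySem.List.slice block none (some 8) else block

theorem pvRange10_cons (n : Int) (h : 0 < n) :
    PySem.List.pyRange 0 n 10 = 0 :: (PySem.List.pyRange 0 (n - 10) 10).map (· + 10) := by
  rw [PySem.List.pyRange_of_pos _ _ (by norm_num : (0:Int) < 10),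
      PySem.List.pyRange_of_pos _ _ (by norm_num : (0:Int) < 10)]
  have hM : (if (0:Int) < n then ((n - 0 + 10 - 1) / 10).toNat else 0)
      = (if (0:Int) < n - 10 then ((n - 10 - 0 + 10 - 1) / 10).toNat else 0) + 1 := by
    split_ifs <;> omega
  rw [hM, List.range_succ_eq_map]
  simp [Function.comp_def]
  intro a _
  ring

theorem pvRange10_nil (n : Int) (h : n ≤ 0) : PySem.List.pyRange 0 n 10 = [] := by
  rw [PySem.List.pyRange_of_pos _ _ (by norm_num : (0:Int) < 10)]
  simp [show ¬ ((0:Int) < n) by omega]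

theorem pvA_eq_chunk : ∀ (fuel : Nat) (cs : List Char), cs.length ≤ fuel →
    ((PySem.List.pyRange 0 (cs.length : Int) 10).map
      (fun i => pvF (PySem.List.slice cs (some i) (some (i + 10))))).flatten = pvChunkSpec cs := by
  intro fuel
  induction fuel with
  | zero =>
    intro cs hcs
    have : cs = [] := List.length_eq_zero_iff.mp (Nat.le_zero.mp hcs)
    subst this
    simp [pvRange10_nil 0 le_rfl, pvChunkSpec]
  | succ f ih =>
    intro cs hcs
    by_cases h10 : cs.length < 10
    · rw [pvChunkSpec]
      simp only [h10, if_true]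
      by_cases h0 : cs.length = 0
      · simp [pvRange10_nil 0 le_rfl, List.length_eq_zero_iff.mp h0]
      · rw [pvRange10_cons _ (by exact_mod_cast Nat.pos_of_ne_zero h0),
            pvRange10_nil _ (by omega)]
        have hsl : PySem.List.slice cs (some 0) (some (0 + 10)) = cs := by
          rw [show ((0:Int) + 10) = ((10:Nat):Int) by norm_num]
          rw [PySem.List.slice_zero_start, PySem.List.slice_to_natCast]
          exact List.take_of_length_le (by omega)
        simp only [List.map_cons, List.map_nil, List.flatten_cons, List.flatten_nil,
          List.append_nil, hsl]
        simp only [pvF]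
        rw [if_neg (by omega)]
    · -- full leading block
      rw [pvChunkSpec]
      simp only [show ¬ cs.length < 10 by omega, if_false]
      rw [pvRange10_cons _ (by exact_mod_cast (by omega : 0 < cs.length))]
      rw [List.map_cons, List.flatten_cons]
      -- head block
      have hhead : pvF (PySem.List.slice cs (some 0) (some (0 + 10))) = cs.take 8 := by
        have hsl : PySem.List.slice cs (some 0) (some (0 + 10)) = cs.take 10 := by
          rw [show ((0:Int) + 10) = ((10:Nat):Int) by norm_num]
          rw [PySem.List.slice_zero_start, PySem.List.slice_to_natCast]
        rw [hsl, pvF, if_pos (by simp [List.length_take]; omega)]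
        rw [show ((8:Int)) = ((8:Nat):Int) by norm_num, PySem.List.slice_to_natCast]
        rw [List.take_take]
        norm_num
      rw [hhead, List.map_map]
      -- tail blocks: shift by 10 into cs.drop 10
      have htail : ((PySem.List.pyRange 0 ((cs.length : Int) - 10) 10).map
            ((fun i => pvF (PySem.List.slice cs (some i) (some (i + 10)))) ∘ (· + 10)))
          = (PySem.List.pyRange 0 (((cs.drop 10).length : Int)) 10).map
            (fun i => pvF (PySem.List.slice (cs.drop 10) (some i) (some (i + 10)))) := by
        have hlen : ((cs.drop 10).length : Int) = (cs.length : Int) - 10 := by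
          simp [List.length_drop]; omega
        rw [hlen]
        apply List.map_congr_left
        intro j hj
        have hj0 : 0 ≤ j := ((PySem.List.mem_pyRange_iff_of_pos (by norm_num) j).mp hj).1
        obtain ⟨k, rfl⟩ : ∃ k : Nat, j = (k : Int) := ⟨j.toNat, (Int.toNat_of_nonneg hj0).symm⟩
        simp only [Function.comp_apply]
        congr 1
        rw [show ((k:Int) + 10) = (((k + 10 : Nat)):Int) by push_cast; ring,
            show (((k + 10 : Nat)):Int) + 10 = (((k + 20 : Nat)):Int) by push_cast; ring,
            PySem.List.slice_natCast, PySem.List.slice_natCast]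
        rw [show k + 20 - (k + 10) = 10 by omega, show k + 10 - k = 10 by omega]
        rw [List.drop_drop]
        rw [show k + 10 = 10 + k from by omega]
      rw [htail, ih (cs.drop 10) (by simp [List.length_drop]; omega)]

theorem pvEnumShift {α : Type} (xs : List α) (s t : Int) :
    PySem.List.enumerate xs (s + t) = (PySem.List.enumerate xs s).map (fun p => (p.1 + t, p.2)) := by
  induction xs generalizing s with
  | nil => simp [PySem.List.enumerate_nil]
  | cons x xs ih =>
    rw [PySem.List.enumerate_cons, PySem.List.enumerate_cons, List.map_cons,
        show s + t + 1 = (s + 1) + t by ring, ih]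

theorem pvFilterLt (ys : List Char) : ∀ (s m : Int),
    ((PySem.List.enumerate ys s).filter (fun p => decide (p.1 < s + m))).map (·.2)
      = ys.take m.toNat := by
  induction ys with
  | nil => intro s m; simp [PySem.List.enumerate_nil]
  | cons y ys ih =>
    intro s m
    rw [PySem.List.enumerate_cons]
    by_cases hm : 0 < m
    · rw [List.filter_cons_of_pos (by simp; omega)]
      have := ih (s + 1) (m - 1)
      rw [show s + 1 + (m - 1) = s + m by ring] at this
      simp only [List.map_cons, this]
      rw [show m.toNat = (m - 1).toNat + 1 by omega, List.take_succ_cons]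
    · rw [List.filter_cons_of_neg (by simp; omega)]
      have := ih (s + 1) (m - 1)
      rw [show s + 1 + (m - 1) = s + m by ring] at this
      rw [this, show m.toNat = 0 by omega, show (m - 1).toNat = 0 by omega]
      simp

theorem pvB_eq_chunk : ∀ (fuel : Nat) (cs : List Char), cs.length ≤ fuel →
    ((PySem.List.enumerate cs 0).filter
        (fun p => decide ((cs.length : Int) - PySem.Int.mod (cs.length : Int) 10 ≤ p.1)
          || decide (PySem.Int.mod p.1 10 < 8))).map (·.2) = pvChunkSpec cs := by
  intro fuel
  induction fuel with
  | zero =>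
    intro cs hcs
    have : cs = [] := List.length_eq_zero_iff.mp (Nat.le_zero.mp hcs)
    subst this
    simp [PySem.List.enumerate_nil, pvChunkSpec]
  | succ f ih =>
    intro cs hcs
    have hmod : PySem.Int.mod (cs.length : Int) 10 = ((cs.length % 10 : Nat) : Int) := by
      exact_mod_cast PySem.Int.mod_natCast cs.length 10
    by_cases h10 : cs.length < 10
    · -- cut = 0: every index is kept
      rw [pvChunkSpec]
      simp only [h10, if_true]
      have hcut : (cs.length : Int) - PySem.Int.mod (cs.length : Int) 10 = 0 := by
        rw [hmod]; push_cast; omega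
      rw [hcut]
      rw [List.filter_eq_self.mpr ?_]
      · exact PySem.List.map_snd_enumerate cs 0
      · intro p hp
        obtain ⟨k, hk, rfl⟩ := (PySem.List.mem_enumerate_iff _ _ _).mp hp
        simp
    · -- split off the first full block
      rw [pvChunkSpec]
      simp only [show ¬ cs.length < 10 by omega, if_false]
      have hlt : (cs.take 10).length = 10 := by simp [List.length_take]; omega
      have key : PySem.List.enumerate cs 0
          = PySem.List.enumerate (cs.take 10) 0
            ++ (PySem.List.enumerate (cs.drop 10) 0).map (fun p => (p.1 + 10, p.2)) := by
        conv_lhs => rw [show cs = cs.take 10 ++ cs.drop 10 from (List.take_append_drop 10 cs).symm]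
        rw [PySem.List.enumerate_append, hlt,
            show ((0:Int) + ((10:Nat):Int)) = (0:Int) + 10 by norm_num, pvEnumShift]
      rw [key, List.filter_append, List.map_append]
      congr 1
      · -- first block gives cs.take 8
        have hpr : ∀ p ∈ PySem.List.enumerate (cs.take 10) 0,
            (decide ((cs.length : Int) - PySem.Int.mod (cs.length : Int) 10 ≤ p.1)
              || decide (PySem.Int.mod p.1 10 < 8)) = decide (p.1 < (0:Int) + 8) := by
          intro p hp
          obtain ⟨k, hk, rfl⟩ := (PySem.List.mem_enumerate_iff _ _ _).mp hp
          have hk10 : k < 10 := by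
            have := hlt ▸ hk
            omega
          have hmk : PySem.Int.mod ((0:Int) + (k : Int)) 10 = ((k % 10 : Nat) : Int) := by
            rw [zero_add]; exact_mod_cast PySem.Int.mod_natCast k 10
          simp only [hmk, hmod]
          apply Bool.eq_iff_iff.mpr
          simp only [Bool.or_eq_true, decide_eq_true_eq]
          constructor
          · intro h'
            rcases h' with h' | h' <;> omega
          · intro h'
            right
            omega
        rw [List.filter_congr hpr, pvFilterLt (cs.take 10) 0 8,
            show ((8:Int)).toNat = 8 from rfl, List.take_take]
        norm_num
      · -- remaining blocks: shift indices down by 10 and use the IH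
        rw [List.filter_map, List.map_map]
        have hmodd : PySem.Int.mod (((cs.drop 10).length : Int)) 10 = (((cs.drop 10).length % 10 : Nat) : Int) := by
          exact_mod_cast PySem.Int.mod_natCast (cs.drop 10).length 10
        have hpred : ((fun p : Int × Char => decide ((cs.length : Int) - PySem.Int.mod (cs.length : Int) 10 ≤ p.1)
              || decide (PySem.Int.mod p.1 10 < 8)) ∘ (fun p : Int × Char => (p.1 + 10, p.2)))
            = (fun p : Int × Char => decide (((cs.drop 10).length : Int) - PySem.Int.mod (((cs.drop 10).length : Int)) 10 ≤ p.1)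
              || decide (PySem.Int.mod p.1 10 < 8)) := by
          funext p
          have hm1 : PySem.Int.mod (p.1 + 10) 10 = PySem.Int.mod p.1 10 := by
            rw [PySem.Int.mod_eq_emod_of_pos (by norm_num : (0:Int) < 10),
                PySem.Int.mod_eq_emod_of_pos (by norm_num : (0:Int) < 10)]
            omega
          have hld : (cs.drop 10).length = cs.length - 10 := by simp [List.length_drop]
          rw [Function.comp_apply]
          simp only [hm1, hmod, hmodd]
          congr 1
          apply Bool.eq_iff_iff.mpr
          simp only [decide_eq_true_eq]
          rw [hld]
          omega
        rw [hpred]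
        have hsnd : ((fun p : Int × Char => p.2) ∘ fun p : Int × Char => (p.1 + 10, p.2))
            = (fun p : Int × Char => p.2) := rfl
        rw [hsnd]
        exact ih (cs.drop 10) (by simp [List.length_drop]; omega)

-- ===== VERDICT (by name: the statement is the Claim_ definition above) =====
theorem remove_9th_and_10th_from_binary_spec : Claim_equal_remove_9th_and_10th_from_binary := by
  intro s _
  unfold Spec_remove_9th_and_10th_from_binary
  unfold remove_9th_and_10th_from_binary remove_9th_and_10th_from_binary_alt
  simp only [PySem.Str.len_eq]
  have hfun : (fun (acc : List (List Char)) (i : Int) =>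
        let block := PySem.List.slice s.toList (some i) (some (i + 10))
        if block.length = 10 then acc ++ [PySem.List.slice block none (some 8)] else acc ++ [block])
      = fun acc i => acc ++ [pvF (PySem.List.slice s.toList (some i) (some (i + 10)))] := by
    funext acc i
    simp only [pvF]
    split_ifs <;> rfl
  rw [hfun, PySem.List.foldl_append_singleton_eq_map, List.nil_append]
  rw [pvA_eq_chunk s.toList.length s.toList le_rfl]
  exact congrArg String.ofList (pvB_eq_chunk s.toList.length s.toList le_rfl).symm
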